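-- pv_equiv track=rewrite | github.com/frisedel/advent2021 | day10/adv10.py | adv10_1
-- ===== SOURCE A (Python) =====
-- from typing import List
--
-- open_close = {'(': ')', '[': ']', '{': '}', '<': '>'}
--
-- def find_closing(syntax_index: int, syntax_line: List[str]):
--     depth = 0
--     for next_char in range(syntax_index, len(syntax_line)):
--         if syntax_line[next_char] in open_close.keys():
--             depth += 1
--         else:
--             depth -= 1
--             if depth == 0:
--                 return syntax_line[next_char]
--
-- def find_error(syntax_line: List[str]) -> str:
--     for index in range(len(syntax_line)):
--         if syntax_line[index] in open_close.keys():
--             opening = syntax_line[index]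
--             closing = find_closing(index, syntax_line)
--             if closing != None and open_close[opening] != closing:
--                 return closing
--     return '-'
--
-- def adv10_1(syntax_data: List[List[str]]):
--     errors: List[str] = []
--     for line in syntax_data:
--         errors.append(find_error(line))
--     total = 0
--     for err in errors:
--         if err == ')':
--             total += 3
--         if err == ']':
--             total += 57
--         if err == '}':
--             total += 1197
--         if err == '>':
--             total += 25137
--     return total
-- ===== SOURCE B (Python) =====
-- from typing import List
--
-- open_close = {'(': ')', '[': ']', '{': '}', '<': '>'}
-- _score = {')': 3, ']': 57, '}': 1197, '>': 25137}
--
-- def adv10_1(syntax_data: List[List[str]]):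
--     total = 0
--     for line in syntax_data:
--         # one stack pass: match[j] = closer that generically matches the opener at index j
--         match = {}
--         stack = []
--         for i, ch in enumerate(line):
--             if ch in open_close:
--                 stack.append(i)
--             elif stack:
--                 match[stack.pop()] = ch
--         # first opener (in index order) whose recorded closer mismatches
--         for i, ch in enumerate(line):
--             if ch in open_close and i in match and open_close[ch] != match[i]:
--                 total += _score.get(match[i], 0)
--                 break
--     return total
-- ===== Notes on version B (the rewrite author's own statement) =====
-- stated objective: alternative
-- what changed: A rescans the line from every opener (find_closing) to find its generic match; B does one stack pass per line recording each opener's matched closer in a dict, then one scan of the openers in order.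
import Mathlib
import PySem

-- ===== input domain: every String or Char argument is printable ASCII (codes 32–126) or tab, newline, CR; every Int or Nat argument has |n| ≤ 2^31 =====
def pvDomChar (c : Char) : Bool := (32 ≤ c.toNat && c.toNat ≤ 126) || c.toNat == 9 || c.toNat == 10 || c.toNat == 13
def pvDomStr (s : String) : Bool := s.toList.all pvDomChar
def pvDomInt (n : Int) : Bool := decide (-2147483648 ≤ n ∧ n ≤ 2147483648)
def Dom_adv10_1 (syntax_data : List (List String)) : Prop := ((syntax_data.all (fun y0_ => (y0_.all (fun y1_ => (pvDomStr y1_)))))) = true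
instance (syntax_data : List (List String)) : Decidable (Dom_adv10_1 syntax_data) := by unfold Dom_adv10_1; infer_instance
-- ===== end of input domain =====

-- B replaces A's per-opener rescan (find_closing from every opener) by a single stack pass per line
-- that records each opener's generically matched closer in a dict, then one scan of the openers in order (alternative algorithm).

-- ===== PORT A =====
-- membership in open_close.keys()
def pvIsOpen (s : String) : Bool := ["(", "[", "{", "<"].contains s

-- open_close[opening] (only ever looked up on openers)
def pvOpenClose (s : String) : String :=
  if s = "(" then ")" else if s = "[" then "]" else if s = "{" then "}" else ">"

-- the 'for next_char in range(syntax_index, len(...))' loop of find_closing, over the remaining suffix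
def findClosingAux : List String → Int → Option String
  | [], _ => none
  | c :: rest, depth =>
    if pvIsOpen c then findClosingAux rest (depth + 1)
    else if depth - 1 = 0 then some c
    else findClosingAux rest (depth - 1)

def find_closing (syntax_index : Nat) (syntax_line : List String) : Option String :=
  findClosingAux (syntax_line.drop syntax_index) 0

-- the 'for index in range(len(...))' loop of find_error (i tracks index, third arg is the suffix)
def findErrorAux (syntax_line : List String) : Nat → List String → String
  | _, [] => "-"
  | i, c :: rest =>
    if pvIsOpen c then
      match find_closing i syntax_line with
      | some closing =>
        if pvOpenClose c ≠ closing then closing else findErrorAux syntax_line (i + 1) rest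
      | none => findErrorAux syntax_line (i + 1) rest
    else findErrorAux syntax_line (i + 1) rest

def find_error (syntax_line : List String) : String :=
  findErrorAux syntax_line 0 syntax_line

def adv10_1 (syntax_data : List (List String)) : Int :=
  let errors := syntax_data.map find_error
  errors.foldl (fun total err =>
    let total := if err = ")" then total + 3 else total
    let total := if err = "]" then total + 57 else total
    let total := if err = "}" then total + 1197 else total
    let total := if err = ">" then total + 25137 else total
    total) 0

-- ===== PORT B =====
-- _score.get(c, 0)
def pvScore (c : String) : Int :=
  if c = ")" then 3 else if c = "]" then 57 else if c = "}" then 1197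
  else if c = ">" then 25137 else 0

-- first loop of B: stack pass building match (dict keyed by opener index)
def bScan : List String → Int → List Int → PySem.Dict Int String → PySem.Dict Int String
  | [], _, _, m => m
  | c :: rest, i, stack, m =>
    if pvIsOpen c then bScan rest (i + 1) (i :: stack) m
    else
      match stack with
      | [] => bScan rest (i + 1) [] m
      | j :: s => bScan rest (i + 1) s (m.insert j c)

-- second loop of B: first opener in index order with a recorded mismatching closer
def bFind : List String → Int → PySem.Dict Int String → Int
  | [], _, _ => 0
  | c :: rest, i, m =>
    if pvIsOpen c then
      match m.get? i with
      | some cl => if pvOpenClose c ≠ cl then pvScore cl else bFind rest (i + 1) m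
      | none => bFind rest (i + 1) m
    else bFind rest (i + 1) m

def bLineScore (line : List String) : Int :=
  bFind line 0 (bScan line 0 [] PySem.Dict.empty)

def adv10_1_alt (syntax_data : List (List String)) : Int :=
  syntax_data.foldl (fun total line => total + bLineScore line) 0

-- ===== PRECONDITION & SPEC =====
def Spec_adv10_1 (syntax_data : List (List String)) (out : Int) : Prop := out = adv10_1_alt syntax_data
instance (syntax_data : List (List String)) (out : Int) : Decidable (Spec_adv10_1 syntax_data out) := by unfold Spec_adv10_1; infer_instance

-- ===== CLAIM (what is proved, stated in full; the proofs are below) =====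
def Claim_equal_adv10_1 : Prop := ∀ (syntax_data : List (List String)), Dom_adv10_1 syntax_data → Spec_adv10_1 syntax_data (adv10_1 syntax_data)

-- ===== LEMMAS AND PROOFS =====

-- The invariant of B's stack pass.
def ScanInv (i : Int) (stack : List Int) (m : PySem.Dict Int String) : Prop :=
  (∀ j ∈ stack, j < i) ∧ stack.Nodup ∧ (∀ j ∈ stack, m.get? j = none) ∧
  (∀ k, (m.get? k).isSome → k < i)

-- step equations
theorem fca_opener (c : String) (rest : List String) (d : Int) (hc : pvIsOpen c = true) :
    findClosingAux (c :: rest) d = findClosingAux rest (d + 1) := by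
  simp [findClosingAux, hc]

theorem fca_pop0 (c : String) (rest : List String) (d : Int) (hc : ¬ pvIsOpen c = true)
    (hd : d - 1 = 0) : findClosingAux (c :: rest) d = some c := by
  simp [findClosingAux, hc, hd]

theorem fca_pop (c : String) (rest : List String) (d : Int) (hc : ¬ pvIsOpen c = true)
    (hd : d - 1 ≠ 0) : findClosingAux (c :: rest) d = findClosingAux rest (d - 1) := by
  simp [findClosingAux, hc, hd]

theorem bScan_opener (c : String) (rest : List String) (i : Int) (stack : List Int)
    (m : PySem.Dict Int String) (hc : pvIsOpen c = true) :
    bScan (c :: rest) i stack m = bScan rest (i + 1) (i :: stack) m := by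
  simp [bScan, hc]

theorem bScan_skip (c : String) (rest : List String) (i : Int)
    (m : PySem.Dict Int String) (hc : ¬ pvIsOpen c = true) :
    bScan (c :: rest) i [] m = bScan rest (i + 1) [] m := by
  simp [bScan, hc]

theorem bScan_pop (c : String) (rest : List String) (i : Int) (j0 : Int) (s : List Int)
    (m : PySem.Dict Int String) (hc : ¬ pvIsOpen c = true) :
    bScan (c :: rest) i (j0 :: s) m = bScan rest (i + 1) s (m.insert j0 c) := by
  simp [bScan, hc]

-- invariant preservation
theorem scanInv_push (i : Int) (stack : List Int) (m : PySem.Dict Int String)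
    (h : ScanInv i stack m) : ScanInv (i + 1) (i :: stack) m := by
  obtain ⟨hlt, hnd, hfresh, hkeys⟩ := h
  refine ⟨?_, ?_, ?_, ?_⟩
  · intro j hj
    rcases List.mem_cons.mp hj with rfl | hj
    · omega
    · have := hlt j hj; omega
  · exact List.nodup_cons.mpr ⟨fun hmem => absurd (hlt i hmem) (by omega), hnd⟩
  · intro j hj
    rcases List.mem_cons.mp hj with rfl | hj
    · cases hmi : m.get? j with
      | none => rfl
      | some v => exact absurd (hkeys j (by simp [hmi])) (by omega)
    · exact hfresh j hj
  · intro k hk; have := hkeys k hk; omega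

theorem scanInv_skip (i : Int) (m : PySem.Dict Int String)
    (h : ScanInv i [] m) : ScanInv (i + 1) [] m :=
  ⟨by simp, by simp, by simp, fun k hk => by have := h.2.2.2 k hk; omega⟩

theorem scanInv_pop (i : Int) (j0 : Int) (s : List Int) (m : PySem.Dict Int String)
    (c : String) (h : ScanInv i (j0 :: s) m) : ScanInv (i + 1) s (m.insert j0 c) := by
  obtain ⟨hlt, hnd, hfresh, hkeys⟩ := h
  refine ⟨?_, (List.nodup_cons.mp hnd).2, ?_, ?_⟩
  · intro j hj; have := hlt j (List.mem_cons_of_mem _ hj); omega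
  · intro j hj
    have hne : j ≠ j0 := fun he => (List.nodup_cons.mp hnd).1 (he ▸ hj)
    rw [PySem.Dict.get?_insert_of_ne m c hne]
    exact hfresh j (List.mem_cons_of_mem _ hj)
  · intro k hk
    rw [PySem.Dict.get?_insert] at hk
    split at hk
    · have := hlt j0 List.mem_cons_self; omega
    · have := hkeys k hk; omega

-- Core: the stack pass assigns to the opener at stack position p exactly what
-- findClosingAux computes at depth p+1, and leaves all other settled keys alone.
theorem bScan_spec : ∀ (rest : List String) (i : Int) (stack : List Int)
    (m : PySem.Dict Int String), ScanInv i stack m →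
    (∀ (p : Nat) (j : Int), stack[p]? = some j →
      (bScan rest i stack m).get? j = findClosingAux rest ((p : Int) + 1)) ∧
    (∀ k, k < i → k ∉ stack → (bScan rest i stack m).get? k = m.get? k) := by
  intro rest
  induction rest with
  | nil =>
    intro i stack m ⟨hlt, hnd, hfresh, hkeys⟩
    refine ⟨fun p j hp => ?_, fun k _ _ => rfl⟩
    have hj : j ∈ stack := List.mem_of_getElem? hp
    simp [bScan, findClosingAux, hfresh j hj]
  | cons c rest ih =>
    intro i stack m hinv
    by_cases hc : pvIsOpen c = true
    · obtain ⟨ih1, ih2⟩ := ih (i + 1) (i :: stack) m (scanInv_push i stack m hinv)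
      rw [bScan_opener c rest i stack m hc]
      constructor
      · intro p j hp
        have h1 := ih1 (p + 1) j (by simpa using hp)
        rw [h1, fca_opener c rest _ hc]
        congr 1
      · intro k hk hkn
        have h2 := ih2 k (by omega) (by
          intro hmem
          rcases List.mem_cons.mp hmem with rfl | hmem
          · omega
          · exact hkn hmem)
        exact h2
    · cases stack with
      | nil =>
        obtain ⟨ih1, ih2⟩ := ih (i + 1) [] m (scanInv_skip i m hinv)
        rw [bScan_skip c rest i m hc]
        refine ⟨fun p j hp => by simp at hp, fun k hk _ => ih2 k (by omega) (by simp)⟩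
      | cons j0 s =>
        obtain ⟨hlt, hnd, hfresh, hkeys⟩ := hinv
        have hj0s : j0 ∉ s := (List.nodup_cons.mp hnd).1
        obtain ⟨ih1, ih2⟩ := ih (i + 1) s (m.insert j0 c)
          (scanInv_pop i j0 s m c ⟨hlt, hnd, hfresh, hkeys⟩)
        rw [bScan_pop c rest i j0 s m hc]
        constructor
        · intro p j hp
          match p, hp with
          | 0, hp =>
            have hj : j0 = j := by simpa using hp
            subst hj
            have h2 := ih2 j0 (by have := hlt j0 List.mem_cons_self; omega) hj0s
            rw [h2, PySem.Dict.get?_insert_self, fca_pop0 c rest _ hc (by norm_num)]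
          | p' + 1, hp =>
            have h1 := ih1 p' j (by simpa using hp)
            rw [h1, fca_pop c rest _ hc (by push_cast; omega)]
            congr 1
            omega
        · intro k hk hkn
          have hne : k ≠ j0 := fun he => hkn (by simp [he])
          have h2 := ih2 k (by omega) (fun hmem => hkn (List.mem_cons_of_mem _ hmem))
          rw [h2, PySem.Dict.get?_insert_of_ne m c hne]

-- Consequence: the final dict maps each opener position n to findClosingAux of the suffix after it at depth 1.
theorem bScan_get :
    ∀ (rest : List String) (i : Int) (stack : List Int) (m : PySem.Dict Int String),
    ScanInv i stack m →
    ∀ (n : Nat) (c : String), rest[n]? = some c → pvIsOpen c = true →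
      (bScan rest i stack m).get? (i + (n : Int)) = findClosingAux (rest.drop (n + 1)) 1 := by
  intro rest
  induction rest with
  | nil => intro _ _ _ _ n c hn; simp at hn
  | cons c0 rest ih =>
    intro i stack m hinv n c hn hc
    match n, hn with
    | 0, hn =>
      have hc0 : c0 = c := by simpa using hn
      subst hc0
      rw [bScan_opener c0 rest i stack m hc]
      have h1 := (bScan_spec rest (i + 1) (i :: stack) m (scanInv_push i stack m hinv)).1
        0 i (by simp)
      simpa using h1
    | n' + 1, hn =>
      have hn' : rest[n']? = some c := by simpa using hn
      have harith : i + ((n' + 1 : Nat) : Int) = (i + 1) + (n' : Int) := by push_cast; ring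
      by_cases hc0 : pvIsOpen c0 = true
      · rw [bScan_opener c0 rest i stack m hc0, harith]
        exact ih (i + 1) (i :: stack) m (scanInv_push i stack m hinv) n' c hn' hc
      · cases stack with
        | nil =>
          rw [bScan_skip c0 rest i m hc0, harith]
          exact ih (i + 1) [] m (scanInv_skip i m hinv) n' c hn' hc
        | cons j0 s =>
          rw [bScan_pop c0 rest i j0 s m hc0, harith]
          exact ih (i + 1) s (m.insert j0 c0) (scanInv_pop i j0 s m c0 hinv) n' c hn' hc

-- Lockstep: the two final scans agree.
theorem bFind_eq (line : List String) (M : PySem.Dict Int String)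
    (hM : ∀ (n : Nat) (c : String), getElem? line n = some c → pvIsOpen c = true →
      M.get? ((n : Int)) = findClosingAux (line.drop (n + 1)) 1) :
    ∀ (rest : List String) (i : Nat), rest = line.drop i →
      bFind rest (i : Int) M = pvScore (findErrorAux line i rest) := by
  intro rest
  induction rest with
  | nil => intro i _; simp [bFind, findErrorAux, pvScore]
  | cons c rest' ih =>
    intro i hdrop
    have hget : getElem? line i = some c := by
      have h0 : (line.drop i)[0]? = some c := by rw [← hdrop]; rfl
      simpa using h0
    have hdrop' : rest' = line.drop (i + 1) := by
      have h1 := congrArg List.tail hdrop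
      simpa [List.tail_drop] using h1
    by_cases hc : pvIsOpen c = true
    · have hMi := hM i c hget hc
      have hfc : find_closing i line = findClosingAux rest' 1 := by
        unfold find_closing
        rw [← hdrop, fca_opener c rest' 0 hc]
        norm_num
      rw [← hdrop'] at hMi
      cases hcl : findClosingAux rest' 1 with
      | none =>
        have h1 : bFind (c :: rest') (i : Int) M = bFind rest' ((i : Int) + 1) M := by
          simp [bFind, hc, hMi, hcl]
        have h2 : findErrorAux line i (c :: rest') = findErrorAux line (i + 1) rest' := by
          simp [findErrorAux, hc, hfc, hcl]
        rw [h1, h2, show ((i : Int) + 1) = (((i + 1 : Nat)) : Int) from by push_cast; ring]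
        exact ih (i + 1) hdrop'
      | some cl =>
        by_cases hmis : pvOpenClose c ≠ cl
        · have h1 : bFind (c :: rest') (i : Int) M = pvScore cl := by
            simp [bFind, hc, hMi, hcl, hmis]
          have h2 : findErrorAux line i (c :: rest') = cl := by
            simp [findErrorAux, hc, hfc, hcl, hmis]
          rw [h1, h2]
        · have h1 : bFind (c :: rest') (i : Int) M = bFind rest' ((i : Int) + 1) M := by
            simp [bFind, hc, hMi, hcl, hmis]
          have h2 : findErrorAux line i (c :: rest') = findErrorAux line (i + 1) rest' := by
            simp [findErrorAux, hc, hfc, hcl, hmis]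
          rw [h1, h2, show ((i : Int) + 1) = (((i + 1 : Nat)) : Int) from by push_cast; ring]
          exact ih (i + 1) hdrop'
    · have h1 : bFind (c :: rest') (i : Int) M = bFind rest' ((i : Int) + 1) M := by
        simp [bFind, hc]
      have h2 : findErrorAux line i (c :: rest') = findErrorAux line (i + 1) rest' := by
        simp [findErrorAux, hc]
      rw [h1, h2, show ((i : Int) + 1) = (((i + 1 : Nat)) : Int) from by push_cast; ring]
      exact ih (i + 1) hdrop'

theorem bLineScore_eq (line : List String) :
    bLineScore line = pvScore (find_error line) := by
  have hinv : ScanInv 0 [] PySem.Dict.empty :=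
    ⟨by simp, by simp, by simp, by simp [PySem.Dict.get?_empty]⟩
  have hM : ∀ (n : Nat) (c : String), getElem? line n = some c → pvIsOpen c = true →
      (bScan line 0 [] PySem.Dict.empty).get? ((n : Int)) = findClosingAux (line.drop (n + 1)) 1 := by
    intro n c hn hc
    have := bScan_get line 0 [] PySem.Dict.empty hinv n c hn hc
    simpa using this
  have := bFind_eq line (bScan line 0 [] PySem.Dict.empty) hM line 0 (by simp)
  simpa [bLineScore, find_error] using this

-- A's four sequential ifs add exactly pvScore of the error string.
theorem stepA_eq (t : Int) (err : String) :
    (let t1 := if err = ")" then t + 3 else t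
     let t2 := if err = "]" then t1 + 57 else t1
     let t3 := if err = "}" then t2 + 1197 else t2
     if err = ">" then t3 + 25137 else t3) = t + pvScore err := by
  simp only [pvScore]
  split_ifs <;> simp_all

theorem foldl_eq (syntax_data : List (List String)) : ∀ (t : Int),
    (syntax_data.map find_error).foldl (fun total err =>
      let total := if err = ")" then total + 3 else total
      let total := if err = "]" then total + 57 else total
      let total := if err = "}" then total + 1197 else total
      let total := if err = ">" then total + 25137 else total
      total) t
    = syntax_data.foldl (fun total line => total + bLineScore line) t := by
  induction syntax_data with
  | nil => intro t; rfl
  | cons line rest ih =>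
    intro t
    simp only [List.map_cons, List.foldl_cons]
    rw [stepA_eq, bLineScore_eq line]
    exact ih (t + pvScore (find_error line))

-- ===== VERDICT (by name: the statement is the Claim_ definition above) =====
theorem adv10_1_spec : Claim_equal_adv10_1 := by
  intro syntax_data _
  unfold Spec_adv10_1 adv10_1 adv10_1_alt
  exact foldl_eq syntax_data 0
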